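-- pv_equiv track=rewrite | github.com/Kshipajaiswal/Steering-Aware-LIDAR-Visualization-Dashboard | lidar_reader.py | get_car_steering_angle
-- ===== SOURCE A (Python) =====
-- def get_car_steering_angle(scan_data, safe_distance=1000):
--     """
--     Decide steering angle based on obstacles in key sectors:
--     - Front center (350–10° or -10–10°): stop or slow down
--     - Front-left (~315° or -45°) and front-right (45°)
--     Returns: angle in degrees (negative = left turn, positive = right turn)
--     """
--
--     front_obstacles = [d for a, d, _ in scan_data if -10 <= a <= 10 and d < safe_distance]
--     right_obstacles = [d for a, d, _ in scan_data if 40 <= a <= 50 and d < safe_distance]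
--     left_obstacles = [d for a, d, _ in scan_data if 310 <= a <= 320 and d < safe_distance]
--
--     if front_obstacles:
--         if left_obstacles and right_obstacles:
--             return 0  # both sides blocked, maybe stop or reverse
--         elif left_obstacles:
--             return 45  # turn right
--         elif right_obstacles:
--             return -45  # turn left
--         else:
--             return -30  # default turn left
--     return 0  # path clear
-- ===== SOURCE B (Python) =====
-- def get_car_steering_angle(scan_data, safe_distance=1000):
--     # One pass building a 3-bit sector mask (bit0 front, bit1 right, bit2 left),
--     # then a table lookup replaces the decision tree; exits early once all bits set.
--     mask = 0
--     for a, d, _ in scan_data: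
--         if d < safe_distance:
--             if -10 <= a <= 10:
--                 mask |= 1
--             elif 40 <= a <= 50:
--                 mask |= 2
--             elif 310 <= a <= 320:
--                 mask |= 4
--         if mask == 7:
--             break
--     return (0, -30, 0, -45, 0, 45, 0, 0)[mask]
-- ===== Notes on version B (the rewrite author's own statement) =====
-- stated objective: alternative
-- what changed: Three separate list comprehensions plus a nested if/elif decision tree are replaced by a single early-exiting pass that builds a 3-bit sector mask and a constant table lookup of the angle.
import Mathlib
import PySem

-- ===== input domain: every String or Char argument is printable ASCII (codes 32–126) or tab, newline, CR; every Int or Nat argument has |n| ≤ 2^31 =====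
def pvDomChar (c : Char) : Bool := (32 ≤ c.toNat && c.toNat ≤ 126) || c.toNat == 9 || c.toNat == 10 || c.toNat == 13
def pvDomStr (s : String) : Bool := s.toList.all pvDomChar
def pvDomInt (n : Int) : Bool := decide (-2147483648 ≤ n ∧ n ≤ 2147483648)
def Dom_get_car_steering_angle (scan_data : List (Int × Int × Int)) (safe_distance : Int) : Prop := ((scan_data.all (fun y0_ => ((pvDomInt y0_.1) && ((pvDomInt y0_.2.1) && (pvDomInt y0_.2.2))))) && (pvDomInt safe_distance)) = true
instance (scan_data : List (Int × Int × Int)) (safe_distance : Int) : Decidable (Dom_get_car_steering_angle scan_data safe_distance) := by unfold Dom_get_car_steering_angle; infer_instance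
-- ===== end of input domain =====

-- B replaces A's three list comprehensions and nested decision tree by a single
-- early-exiting pass building a 3-bit sector mask plus a constant table lookup (objective: alternative).

-- ===== PORT A =====
def get_car_steering_angle (scan_data : List (Int × Int × Int)) (safe_distance : Int) : Int :=
  let front_obstacles := (scan_data.filter (fun p => decide (-10 ≤ p.1 ∧ p.1 ≤ 10 ∧ p.2.1 < safe_distance))).map (fun p => p.2.1)
  let right_obstacles := (scan_data.filter (fun p => decide (40 ≤ p.1 ∧ p.1 ≤ 50 ∧ p.2.1 < safe_distance))).map (fun p => p.2.1)
  let left_obstacles := (scan_data.filter (fun p => decide (310 ≤ p.1 ∧ p.1 ≤ 320 ∧ p.2.1 < safe_distance))).map (fun p => p.2.1)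
  if front_obstacles ≠ [] then
    if left_obstacles ≠ [] ∧ right_obstacles ≠ [] then 0
    else if left_obstacles ≠ [] then 45
    else if right_obstacles ≠ [] then -45
    else -30
  else 0

-- ===== PORT B =====
-- the single pass of Source B: mask accumulation with early break (recursion = the for/break loop)
def pvMaskLoop (safe_distance : Int) : List (Int × Int × Int) → Int → Int
  | [], m => m
  | (a, d, _) :: rest, m =>
    let m' :=
      if d < safe_distance then
        if -10 ≤ a ∧ a ≤ 10 then Int.lor m 1
        else if 40 ≤ a ∧ a ≤ 50 then Int.lor m 2
        else if 310 ≤ a ∧ a ≤ 320 then Int.lor m 4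
        else m
      else m
    if m' = 7 then m' else pvMaskLoop safe_distance rest m'

def get_car_steering_angle_alt (scan_data : List (Int × Int × Int)) (safe_distance : Int) : Int :=
  let mask := pvMaskLoop safe_distance scan_data 0
  -- tuple indexing (0, -30, 0, -45, 0, 45, 0, 0)[mask]; mask is always in 0..7 so it never raises
  (PySem.List.pyGet? ([0, -30, 0, -45, 0, 45, 0, 0] : List Int) mask).getD 0

-- ===== PRECONDITION & SPEC =====
def Spec_get_car_steering_angle (scan_data : List (Int × Int × Int)) (safe_distance : Int) (out : Int) : Prop := out = get_car_steering_angle_alt scan_data safe_distance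
instance (scan_data : List (Int × Int × Int)) (safe_distance : Int) (out : Int) : Decidable (Spec_get_car_steering_angle scan_data safe_distance out) := by unfold Spec_get_car_steering_angle; infer_instance

-- ===== CLAIM (what is proved, stated in full; the proofs are below) =====
def Claim_equal_get_car_steering_angle : Prop := ∀ (scan_data : List (Int × Int × Int)) (safe_distance : Int), Dom_get_car_steering_angle scan_data safe_distance → Spec_get_car_steering_angle scan_data safe_distance (get_car_steering_angle scan_data safe_distance)

-- ===== LEMMAS AND PROOFS =====

-- a mask built from the three sector flags
def pvBits (f r l : Bool) : Int :=
  (if f then 1 else 0) + (if r then 2 else 0) + (if l then 4 else 0)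

theorem pvBits_or1 (f r l : Bool) : Int.lor (pvBits f r l) 1 = pvBits true r l := by
  cases f <;> cases r <;> cases l <;> decide

theorem pvBits_or2 (f r l : Bool) : Int.lor (pvBits f r l) 2 = pvBits f true l := by
  cases f <;> cases r <;> cases l <;> decide

theorem pvBits_or4 (f r l : Bool) : Int.lor (pvBits f r l) 4 = pvBits f r true := by
  cases f <;> cases r <;> cases l <;> decide

theorem pvBits_eq7 (f r l : Bool) : pvBits f r l = 7 ↔ f = true ∧ r = true ∧ l = true := by
  cases f <;> cases r <;> cases l <;> decide

def pF (sd : Int) (p : Int × Int × Int) : Bool := decide (-10 ≤ p.1 ∧ p.1 ≤ 10 ∧ p.2.1 < sd)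
def pR (sd : Int) (p : Int × Int × Int) : Bool := decide (40 ≤ p.1 ∧ p.1 ≤ 50 ∧ p.2.1 < sd)
def pL (sd : Int) (p : Int × Int × Int) : Bool := decide (310 ≤ p.1 ∧ p.1 ≤ 320 ∧ p.2.1 < sd)

theorem pvMaskLoop_spec (sd : Int) (s : List (Int × Int × Int)) :
    ∀ (f r l : Bool),
      pvMaskLoop sd s (pvBits f r l) =
        pvBits (f || s.any (pF sd)) (r || s.any (pR sd)) (l || s.any (pL sd)) := by
  induction s with
  | nil => intro f r l; simp [pvMaskLoop]
  | cons hd tl ih =>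
    intro f r l
    obtain ⟨a, d, c⟩ := hd
    simp only [pvMaskLoop, List.any_cons]
    by_cases hd1 : d < sd
    · rw [if_pos hd1]
      by_cases hf : -10 ≤ a ∧ a ≤ 10
      · have hRf : pR sd (a, d, c) = false := by simp [pR]; omega
        have hLf : pL sd (a, d, c) = false := by simp [pL]; omega
        have hFt : pF sd (a, d, c) = true := by simp [pF]; omega
        rw [if_pos hf, pvBits_or1, hFt, hRf, hLf]
        simp only [Bool.false_or, Bool.or_true]
        split
        · next h7 =>
          obtain ⟨-, h2, h3⟩ := (pvBits_eq7 _ _ _).mp h7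
          simp [h2, h3]
        · next _ => simpa using ih true r l
      · rw [if_neg hf]
        by_cases hr : 40 ≤ a ∧ a ≤ 50
        · have hFf : pF sd (a, d, c) = false := by simp [pF]; omega
          have hLf : pL sd (a, d, c) = false := by simp [pL]; omega
          have hRt : pR sd (a, d, c) = true := by simp [pR]; omega
          rw [if_pos hr, pvBits_or2, hFf, hLf, hRt]
          simp only [Bool.false_or, Bool.or_true]
          split
          · next h7 =>
            obtain ⟨h1, -, h3⟩ := (pvBits_eq7 _ _ _).mp h7
            simp [h1, h3]
          · next _ => simpa using ih f true l
        · rw [if_neg hr]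
          by_cases hl : 310 ≤ a ∧ a ≤ 320
          · have hFf : pF sd (a, d, c) = false := by simp [pF]; omega
            have hRf : pR sd (a, d, c) = false := by simp [pR]; omega
            have hLt : pL sd (a, d, c) = true := by simp [pL]; omega
            rw [if_pos hl, pvBits_or4, hFf, hRf, hLt]
            simp only [Bool.false_or, Bool.or_true]
            split
            · next h7 =>
              obtain ⟨h1, h2, -⟩ := (pvBits_eq7 _ _ _).mp h7
              simp [h1, h2]
            · next _ => simpa using ih f r true
          · have hFf : pF sd (a, d, c) = false := by simp [pF]; omega
            have hRf : pR sd (a, d, c) = false := by simp [pR]; omega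
            have hLf : pL sd (a, d, c) = false := by simp [pL]; omega
            rw [if_neg hl, hFf, hRf, hLf]
            simp only [Bool.false_or]
            split
            · next h7 =>
              obtain ⟨h1, h2, h3⟩ := (pvBits_eq7 _ _ _).mp h7
              simp [h1, h2, h3]
            · next _ => exact ih f r l
    · have hFf : pF sd (a, d, c) = false := by simp [pF]; omega
      have hRf : pR sd (a, d, c) = false := by simp [pR]; omega
      have hLf : pL sd (a, d, c) = false := by simp [pL]; omega
      rw [if_neg hd1, hFf, hRf, hLf]
      simp only [Bool.false_or]
      split
      · next h7 =>
        obtain ⟨h1, h2, h3⟩ := (pvBits_eq7 _ _ _).mp h7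
        simp [h1, h2, h3]
      · next _ => exact ih f r l

theorem filter_map_ne_nil_iff_any {α : Type} (s : List α) (p : α → Bool) (g : α → Int) :
    ((s.filter p).map g ≠ []) ↔ s.any p = true := by
  simp [List.map_eq_nil_iff, List.filter_eq_nil_iff, List.any_eq_true]

theorem get_car_steering_angle_eq_alt (s : List (Int × Int × Int)) (sd : Int) :
    get_car_steering_angle s sd = get_car_steering_angle_alt s sd := by
  unfold get_car_steering_angle get_car_steering_angle_alt
  have hmask : pvMaskLoop sd s 0 = pvBits (s.any (pF sd)) (s.any (pR sd)) (s.any (pL sd)) := by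
    simpa using pvMaskLoop_spec sd s false false false
  have hFiff : ((s.filter (fun p => decide (-10 ≤ p.1 ∧ p.1 ≤ 10 ∧ p.2.1 < sd))).map (fun p => p.2.1) ≠ []) ↔ s.any (pF sd) = true :=
    filter_map_ne_nil_iff_any s (pF sd) _
  have hRiff : ((s.filter (fun p => decide (40 ≤ p.1 ∧ p.1 ≤ 50 ∧ p.2.1 < sd))).map (fun p => p.2.1) ≠ []) ↔ s.any (pR sd) = true :=
    filter_map_ne_nil_iff_any s (pR sd) _
  have hLiff : ((s.filter (fun p => decide (310 ≤ p.1 ∧ p.1 ≤ 320 ∧ p.2.1 < sd))).map (fun p => p.2.1) ≠ []) ↔ s.any (pL sd) = true :=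
    filter_map_ne_nil_iff_any s (pL sd) _
  rw [hmask]
  cases hF : s.any (pF sd) <;> cases hR : s.any (pR sd) <;> cases hL : s.any (pL sd) <;>
    simp only [hFiff, hRiff, hLiff, hF, hR, hL] <;>
    simp [pvBits, PySem.List.pyGet?, PySem.List.pyIdx?]

-- ===== VERDICT (by name: the statement is the Claim_ definition above) =====
theorem get_car_steering_angle_spec : Claim_equal_get_car_steering_angle := by
  intro s sd _
  unfold Spec_get_car_steering_angle
  exact get_car_steering_angle_eq_alt s sd
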